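-- pv_equiv track=rewrite | github.com/akatsuki-org/TCS-CodeVita-practice-problems | B m2/solution.py | findBitScorePairs
-- ===== SOURCE A (Python) =====
-- from collections import Counter
--
-- def findBitScorePairs(bitScoreList):
--     evenList = []
--     oddList = []
--     for i in range(len(bitScoreList)):
--         if(i%2 == 0):
--             oddList.append(bitScoreList[i]) # odd as per 1 based index
--         else:
--             evenList.append(bitScoreList[i])
--
--     MSBEven = convertMSBList(evenList)
--     MSBOdd = convertMSBList(oddList)
--
--     evenPairCount = findPairsCount(MSBEven)
--     oddPairCount = findPairsCount(MSBOdd)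
--
--     return sum(evenPairCount + oddPairCount)
--
-- def findPairsCount(theList):
--     theCountList = []
--
--     c = Counter(theList)
--     cList = list(c.items())
--
--     for count in cList:
--         theCountList.append(count[1] - 1)
--
--     return theCountList
--
-- def convertMSBList(theList):
--     MSBList = []
--     for listItem in theList:
--         MSBList.append(listItem[0])
--
--     return MSBList
-- ===== SOURCE B (Python) =====
-- def findBitScorePairs(bitScoreList):
--     seenOddPos = set()   # chars seen at 0-based even indices (1-based odd positions)
--     seenEvenPos = set()  # chars seen at 0-based odd indices
--     duplicates = 0
--     for i, item in enumerate(bitScoreList):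
--         c = item[0]
--         if i % 2 == 0:
--             if c in seenOddPos:
--                 duplicates += 1
--             else:
--                 seenOddPos.add(c)
--         else:
--             if c in seenEvenPos:
--                 duplicates += 1
--             else:
--                 seenEvenPos.add(c)
--     return duplicates
-- ===== Notes on version B (the rewrite author's own statement) =====
-- stated objective: alternative
-- what changed: Replaces A's staged pipeline (parity-split into two lists, MSB extraction pass, Counter histogram, per-key count-1 accumulation, final sum) with a single online pass that keeps one seen-set per parity and increments a duplicate counter whenever the current first character was already seen in its parity group.
import Mathlib
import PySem

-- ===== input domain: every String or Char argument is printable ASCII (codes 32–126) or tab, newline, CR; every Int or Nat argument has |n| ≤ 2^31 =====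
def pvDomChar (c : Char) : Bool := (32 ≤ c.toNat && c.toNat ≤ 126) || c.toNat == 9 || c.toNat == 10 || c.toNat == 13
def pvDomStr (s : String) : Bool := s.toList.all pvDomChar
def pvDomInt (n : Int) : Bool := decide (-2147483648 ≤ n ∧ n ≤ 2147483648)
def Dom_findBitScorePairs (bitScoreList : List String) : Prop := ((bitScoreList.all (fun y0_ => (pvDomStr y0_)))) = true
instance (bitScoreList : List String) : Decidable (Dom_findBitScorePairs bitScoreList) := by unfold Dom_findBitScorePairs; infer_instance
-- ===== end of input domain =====

-- B replaces A's staged pipeline (parity split, MSB pass, Counter, count-1 accumulation, sum)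
-- with one online pass keeping a seen-set per parity and a duplicate counter; objective: alternative.

-- ===== PORT A =====
-- listItem[0]: exact (some char) on nonempty strings; Pre_ excludes "" where Python raises IndexError
def pvFirstChar (s : String) : Char := (PySem.Str.pyGet? s 0).getD ' '

def convertMSBList (theList : List String) : List Char :=
  theList.foldl (fun MSBList listItem => MSBList ++ [pvFirstChar listItem]) []

def findPairsCount (theList : List Char) : List Int :=
  let c := PySem.Dict.counter theList
  let cList := c.items
  cList.foldl (fun theCountList count => theCountList ++ [count.2 - 1]) []

def findBitScorePairs (bitScoreList : List String) : Int :=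
  let p := (PySem.List.pyRange 0 (bitScoreList.length : Int) 1).foldl
    (fun (p : List String × List String) i =>
      if PySem.Int.mod i 2 == 0 then (p.1, p.2 ++ [PySem.List.pyGetD bitScoreList i ""])
      else (p.1 ++ [PySem.List.pyGetD bitScoreList i ""], p.2)) ([], [])
  let MSBEven := convertMSBList p.1
  let MSBOdd := convertMSBList p.2
  let evenPairCount := findPairsCount MSBEven
  let oddPairCount := findPairsCount MSBOdd
  (evenPairCount ++ oddPairCount).sum

-- ===== PORT B =====
-- single pass over enumerate: state = (seenOddPos, seenEvenPos, duplicates)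
def findBitScorePairs_alt (bitScoreList : List String) : Int :=
  ((PySem.List.enumerate bitScoreList 0).foldl
    (fun (st : PySem.Set Char × PySem.Set Char × Int) q =>
      let c := (PySem.Str.pyGet? q.2 0).getD ' '
      if PySem.Int.mod q.1 2 == 0 then
        if PySem.Set.contains st.1 c then (st.1, st.2.1, st.2.2 + 1)
        else (PySem.Set.add st.1 c, st.2.1, st.2.2)
      else
        if PySem.Set.contains st.2.1 c then (st.1, st.2.1, st.2.2 + 1)
        else (st.1, PySem.Set.add st.2.1 c, st.2.2))
    (PySem.Set.empty, PySem.Set.empty, 0)).2.2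

-- ===== PRECONDITION & SPEC =====
-- Pre_ excludes lists containing an empty string: there item[0] raises IndexError in both A and B.
def Pre_findBitScorePairs (bitScoreList : List String) : Prop :=
  (bitScoreList.all (fun s => !(s.toList.isEmpty))) = true
instance (bitScoreList : List String) : Decidable (Pre_findBitScorePairs bitScoreList) := by
  unfold Pre_findBitScorePairs; infer_instance

def pvWitness_findBitScorePairs : List String := ["ab", "cd", "aa"]

def Spec_findBitScorePairs (bitScoreList : List String) (out : Int) : Prop := out = findBitScorePairs_alt bitScoreList
instance (bitScoreList : List String) (out : Int) : Decidable (Spec_findBitScorePairs bitScoreList out) := by unfold Spec_findBitScorePairs; infer_instance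

-- ===== CLAIM (what is proved, stated in full; the proofs are below) =====
def Claim_equal_findBitScorePairs : Prop := ∀ (bitScoreList : List String), Dom_findBitScorePairs bitScoreList → Pre_findBitScorePairs bitScoreList → Spec_findBitScorePairs bitScoreList (findBitScorePairs bitScoreList)

-- ===== LEMMAS AND PROOFS =====

-- A's index loop over range(len) equals the same fold over enumerate(bitScoreList)
lemma pvLoopA_eq : ∀ (l pre : List String) (init : List String × List String),
    (PySem.List.pyRange (pre.length : Int) ((pre.length : Int) + (l.length : Int)) 1).foldl
      (fun p i =>
        if PySem.Int.mod i 2 == 0 then (p.1, p.2 ++ [PySem.List.pyGetD (pre ++ l) i ""])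
        else (p.1 ++ [PySem.List.pyGetD (pre ++ l) i ""], p.2)) init
    = (PySem.List.enumerate l (pre.length : Int)).foldl
      (fun p q => if PySem.Int.mod q.1 2 == 0 then (p.1, p.2 ++ [q.2]) else (p.1 ++ [q.2], p.2)) init := by
  intro l
  induction l with
  | nil =>
      intro pre init
      rw [PySem.List.pyRange_one_eq_nil (by simp)]
      simp [PySem.List.enumerate]
  | cons x xs ih =>
      intro pre init
      rw [PySem.List.pyRange_one_cons (by simp)]
      have hget : PySem.List.pyGetD (pre ++ x :: xs) (pre.length : Int) "" = x := by
        rw [PySem.List.pyGetD_natCast]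
        simp [List.getD]
      rw [List.foldl_cons, PySem.List.enumerate_cons, List.foldl_cons, hget]
      have ih' := ih (pre ++ [x])
        (if PySem.Int.mod (pre.length : Int) 2 == 0 then (init.1, init.2 ++ [x])
         else (init.1 ++ [x], init.2))
      rw [show ((pre ++ [x]) ++ xs : List String) = pre ++ x :: xs by simp] at ih'
      rw [show (((pre ++ [x]).length : Nat) : Int) = (pre.length : Int) + 1 by push_cast [List.length_append, List.length_cons, List.length_nil]; ring] at ih'
      rw [show ((pre.length : Int) + ((x :: xs).length : Int)) = ((pre.length : Int) + 1) + (xs.length : Int) by push_cast [List.length_cons]; ring]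
      simpa using ih'

-- the fold over enumerate splits the list by index parity
lemma pvLoopSplit : ∀ (l : List (Int × String)) (e o : List String),
    l.foldl (fun p q => if PySem.Int.mod q.1 2 == 0 then (p.1, p.2 ++ [q.2]) else (p.1 ++ [q.2], p.2)) (e, o)
    = (e ++ (l.filter (fun q => !(PySem.Int.mod q.1 2 == 0))).map (·.2),
       o ++ (l.filter (fun q => PySem.Int.mod q.1 2 == 0)).map (·.2)) := by
  intro l
  induction l with
  | nil => intro e o; simp
  | cons q l ih =>
      intro e o
      cases hm : PySem.Int.mod q.1 2 == 0 with
      | true =>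
          simp only [List.foldl_cons, List.filter_cons, hm, Bool.not_true, if_true,
            ih, List.map_cons]
          simp
      | false =>
          simp only [List.foldl_cons, List.filter_cons, hm, Bool.not_false, if_true,
            ih, List.map_cons]
          simp

lemma pvOfListPermDedup (cs : List Char) : (PySem.Set.ofList cs).Perm cs.dedup := by
  apply List.perm_of_nodup_nodup_toFinset_eq (PySem.Set.nodup_ofList cs) cs.nodup_dedup
  ext x; simp [PySem.Set.mem_ofList]

lemma pvSumCounts (cs : List Char) :
    ((PySem.Set.ofList cs).map fun k => (cs.count k : Int)).sum = (cs.length : Int) := by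
  rw [List.Perm.sum_eq ((pvOfListPermDedup cs).map _)]
  rw [← List.sum_map_count_dedup_eq_length cs, Nat.cast_list_sum, List.map_map]
  rfl

-- sum of (count-1) over Counter items is len - number of distinct values
lemma pvPairsCountSum (cs : List Char) :
    (findPairsCount cs).sum = (cs.length : Int) - ((PySem.Set.ofList cs).length : Int) := by
  unfold findPairsCount
  rw [PySem.List.foldl_append_singleton_eq_map, PySem.Dict.items_counter, List.map_map]
  simp only [List.nil_append]
  have : ((fun kv : Char × Int => kv.2 - 1) ∘ fun k => (k, (cs.count k : Int)))
      = fun k => (cs.count k : Int) + (-1) := by funext k; simp; ring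
  rw [this, PySem.List.sum_map_add_int, pvSumCounts, PySem.List.sum_map_const_int]
  ring

lemma pvConvert_eq_map (l : List String) : convertMSBList l = l.map pvFirstChar := by
  unfold convertMSBList
  rw [PySem.List.foldl_append_singleton_eq_map, List.nil_append]

-- ---- B-side: the online duplicate counter ----
-- single-group step and its duplicate count
def pvG (p : PySem.Set Char × Int) (c : Char) : PySem.Set Char × Int :=
  if PySem.Set.contains p.1 c then (p.1, p.2 + 1) else (PySem.Set.add p.1 c, p.2)

def pvDcount (s : PySem.Set Char) (cs : List Char) : Int := (cs.foldl pvG (s, 0)).2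

-- the counter component is an additive offset
lemma pvG_shift : ∀ (cs : List Char) (s : PySem.Set Char) (d : Int),
    (cs.foldl pvG (s, d)).2 = d + (cs.foldl pvG (s, 0)).2 := by
  intro cs
  induction cs with
  | nil => intro s d; simp
  | cons c cs ih =>
      intro s d
      by_cases h : PySem.Set.contains s c = true
      · simp only [List.foldl_cons, pvG, h, if_true]
        rw [ih s (d + 1), ih s (0 + 1)]; ring
      · simp only [List.foldl_cons, pvG, h, if_false, Bool.false_eq_true]
        rw [ih (PySem.Set.add s c) d]

lemma pvDcount_cons (s : PySem.Set Char) (c : Char) (cs : List Char) :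
    pvDcount s (c :: cs)
      = if PySem.Set.contains s c then 1 + pvDcount s cs else pvDcount (PySem.Set.add s c) cs := by
  by_cases h : PySem.Set.contains s c = true
  · simp only [pvDcount, List.foldl_cons, pvG, h, if_true]
    rw [pvG_shift cs s (0 + 1)]; ring_nf
  · simp only [pvDcount, List.foldl_cons, pvG, h, if_false, Bool.false_eq_true]

-- the duplicate count equals length minus the number of newly seen distinct values
lemma pvDcount_closed : ∀ (cs : List Char) (s : PySem.Set Char),
    pvDcount s cs = (cs.length : Int) - (((cs.foldl PySem.Set.add s).length : Int) - (s.length : Int)) := by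
  intro cs
  induction cs with
  | nil => intro s; simp [pvDcount]
  | cons c cs ih =>
      intro s
      rw [pvDcount_cons]
      by_cases h : PySem.Set.contains s c = true
      · have hadd : PySem.Set.add s c = s := by
          simp [PySem.Set.add, (PySem.Set.contains_iff s c).mp h]
        simp only [h, if_true, List.foldl_cons, hadd, ih s, List.length_cons]
        push_cast; ring
      · have hadd : PySem.Set.add s c = s ++ [c] := by
          have hnm : c ∉ s := fun hm => h ((PySem.Set.contains_iff s c).mpr hm)
          simp [PySem.Set.add, hnm]
        simp only [h, if_false, Bool.false_eq_true, List.foldl_cons, ih (PySem.Set.add s c),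
          List.length_cons]
        rw [hadd]
        push_cast [List.length_append, List.length_cons, List.length_nil]; ring

-- B's interleaved fold counts the duplicates of each parity group independently
lemma pvLoopB : ∀ (l : List (Int × String)) (se so : PySem.Set Char) (d : Int),
    (l.foldl
      (fun (st : PySem.Set Char × PySem.Set Char × Int) q =>
        let c := (PySem.Str.pyGet? q.2 0).getD ' '
        if PySem.Int.mod q.1 2 == 0 then
          if PySem.Set.contains st.1 c then (st.1, st.2.1, st.2.2 + 1)
          else (PySem.Set.add st.1 c, st.2.1, st.2.2)
        else
          if PySem.Set.contains st.2.1 c then (st.1, st.2.1, st.2.2 + 1)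
          else (st.1, PySem.Set.add st.2.1 c, st.2.2))
      (se, so, d)).2.2
    = d + pvDcount se ((l.filter (fun q => PySem.Int.mod q.1 2 == 0)).map (fun q => (PySem.Str.pyGet? q.2 0).getD ' '))
        + pvDcount so ((l.filter (fun q => !(PySem.Int.mod q.1 2 == 0))).map (fun q => (PySem.Str.pyGet? q.2 0).getD ' ')) := by
  intro l
  induction l with
  | nil => intro se so d; simp [pvDcount]
  | cons q l ih =>
      intro se so d
      cases hm : PySem.Int.mod q.1 2 == 0 with
      | true =>
          simp only [List.foldl_cons, List.filter_cons, hm, Bool.not_true, if_true, Bool.false_eq_true,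
            if_false, List.map_cons]
          by_cases h : PySem.Set.contains se ((PySem.Str.pyGet? q.2 0).getD ' ') = true
          · rw [if_pos h, ih, pvDcount_cons, if_pos h]; ring
          · rw [if_neg h, ih, pvDcount_cons, if_neg h]
      | false =>
          simp only [List.foldl_cons, List.filter_cons, hm, Bool.not_false, if_true, if_false,
            Bool.false_eq_true, List.map_cons]
          by_cases h : PySem.Set.contains so ((PySem.Str.pyGet? q.2 0).getD ' ') = true
          · rw [if_pos h, ih, pvDcount_cons, if_pos h]; ring
          · rw [if_neg h, ih, pvDcount_cons, if_neg h]

-- ===== VERDICT (by name: the statement is the Claim_ definition above) =====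
theorem findBitScorePairs_spec : Claim_equal_findBitScorePairs := by
  unfold Claim_equal_findBitScorePairs
  intro l _ _
  unfold Spec_findBitScorePairs findBitScorePairs findBitScorePairs_alt
  have h0 := pvLoopA_eq l [] ([], [])
  simp only [List.nil_append, List.length_nil, Nat.cast_zero, zero_add] at h0
  dsimp only
  rw [h0, pvLoopSplit]
  dsimp only
  simp only [List.nil_append]
  rw [pvConvert_eq_map, pvConvert_eq_map, List.sum_append, pvPairsCountSum, pvPairsCountSum,
    pvLoopB]
  rw [pvDcount_closed, pvDcount_closed]
  simp only [PySem.Set.empty, PySem.Set.ofList_eq_foldl, List.map_map, List.length_nil,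
    List.length_map, Function.comp_def]
  simp only [pvFirstChar]
  push_cast; ring
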